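-- pv_equiv track=rewrite | github.com/sukhada-sukhada/lc4eu | USR-to-hindi/common.py | add_GNP
-- ===== SOURCE A (Python) =====
-- def add_GNP(full_data, GNP_dict):
--     transformed_data = []
--     for data in full_data:
--         index = data[0]
--         if index in GNP_dict:
--             temp = list(data)
--             term = GNP_dict[index]
--             for t in term:
--                 tag = t[0]
--                 val = t[1]
--                 if tag == 'before':
--                     temp[1] = val + ' ' + temp[1]
--                 else:
--                     temp[1] = temp[1] + ' ' + val
--             data = tuple(temp)
--         transformed_data.append(data)
--
--     return transformed_data
-- ===== SOURCE B (Python) =====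
-- def add_GNP(full_data, GNP_dict):
--     # Stage 1: build, once, a table mapping each GNP index to the ready-made
--     # (prefix, suffix) strings its term list induces.
--     wrapped = {
--         k: (''.join(v + ' ' for tag, v in reversed(terms) if tag == 'before'),
--             ''.join(' ' + v for tag, v in terms if tag != 'before'))
--         for k, terms in GNP_dict.items()
--     }
--     # Stage 2: one lookup + one concatenation per data entry.
--     def assemble(index, val):
--         if index in wrapped:
--             pre, suf = wrapped[index]
--             return (index, pre + val + suf)
--         return (index, val)
--     return [assemble(index, val) for index, val in full_data]
-- ===== Notes on version B (the rewrite author's own statement) =====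
-- stated objective: alternative
-- what changed: B precomputes a per-key table mapping each GNP index to its finished (prefix, suffix) pair in one staged pass over GNP_dict (prefix from the reversed before-terms, suffix from the rest), so each data entry is handled by a single table lookup and one three-way concatenation instead of A's per-entry loop over the term list mutating the value string.
import Mathlib
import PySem

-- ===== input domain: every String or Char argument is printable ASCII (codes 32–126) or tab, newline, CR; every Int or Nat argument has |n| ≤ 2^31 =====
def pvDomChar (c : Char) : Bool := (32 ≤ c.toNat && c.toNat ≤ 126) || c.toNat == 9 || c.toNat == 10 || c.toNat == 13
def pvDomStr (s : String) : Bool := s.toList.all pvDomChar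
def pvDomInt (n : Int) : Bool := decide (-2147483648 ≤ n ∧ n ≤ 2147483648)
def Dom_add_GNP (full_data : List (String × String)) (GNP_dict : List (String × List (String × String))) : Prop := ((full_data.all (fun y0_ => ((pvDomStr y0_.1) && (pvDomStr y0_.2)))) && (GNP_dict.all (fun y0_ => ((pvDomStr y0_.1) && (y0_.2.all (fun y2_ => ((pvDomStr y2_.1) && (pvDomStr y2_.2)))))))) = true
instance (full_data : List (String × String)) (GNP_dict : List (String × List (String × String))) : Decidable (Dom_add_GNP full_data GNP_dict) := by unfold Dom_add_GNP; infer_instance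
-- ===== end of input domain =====

-- B replaces A's per-entry term loop by a precomputed per-key (prefix, suffix) table
-- built in one staged pass over GNP_dict, then one lookup + one concatenation per entry
-- (objective: alternative decomposition; same result, no speed claim).

-- ===== PORT A =====
def add_GNP (full_data : List (String × String)) (GNP_dict : List (String × List (String × String))) : List (String × String) :=
  full_data.foldl
    (fun transformed_data data =>
      let data' :=
        match (PySem.Dict.ofList GNP_dict).get? data.1 with
        | some term =>
            term.foldl
              (fun temp t =>
                if t.1 == "before" then (temp.1, t.2 ++ " " ++ temp.2)
                else (temp.1, temp.2 ++ " " ++ t.2))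
              data
        | none => data
      transformed_data ++ [data'])
    []

-- ===== PORT B =====
-- prefix from the before-terms read in reverse (Source B's reversed(terms) generator)
def pvPre (terms : List (String × String)) : String :=
  PySem.Str.join "" ((terms.reverse.filter (fun t => t.1 == "before")).map (fun t => t.2 ++ " "))

-- suffix from the non-before terms in order
def pvSuf (terms : List (String × String)) : String :=
  PySem.Str.join "" ((terms.filter (fun t => t.1 != "before")).map (fun t => " " ++ t.2))

def add_GNP_alt (full_data : List (String × String)) (GNP_dict : List (String × List (String × String))) : List (String × String) :=
  let wrapped : PySem.Dict String (String × String) :=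
    (PySem.Dict.ofList GNP_dict).items.foldl
      (fun d p => d.insert p.1 (pvPre p.2, pvSuf p.2)) PySem.Dict.empty
  full_data.map
    (fun p =>
      match wrapped.get? p.1 with
      | some ps => (p.1, ps.1 ++ p.2 ++ ps.2)
      | none => p)

-- ===== PRECONDITION & SPEC =====
def Spec_add_GNP (full_data : List (String × String)) (GNP_dict : List (String × List (String × String))) (out : List (String × String)) : Prop := out = add_GNP_alt full_data GNP_dict
instance (full_data : List (String × String)) (GNP_dict : List (String × List (String × String))) (out : List (String × String)) : Decidable (Spec_add_GNP full_data GNP_dict out) := by unfold Spec_add_GNP; infer_instance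

-- ===== CLAIM (what is proved, stated in full; the proofs are below) =====
def Claim_equal_add_GNP : Prop := ∀ (full_data : List (String × String)) (GNP_dict : List (String × List (String × String))), Dom_add_GNP full_data GNP_dict → Spec_add_GNP full_data GNP_dict (add_GNP full_data GNP_dict)

-- ===== LEMMAS AND PROOFS =====

theorem pv_join0_nil : PySem.Str.join "" ([] : List String) = "" := by
  simp [PySem.Str.join, PySem.Chars.join_nil]

theorem pv_join0_cons (x : String) (L : List String) :
    PySem.Str.join "" (x :: L) = x ++ PySem.Str.join "" L := by
  cases L with
  | nil => simp [PySem.Str.join, PySem.Chars.join_singleton, PySem.Chars.join_nil]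
  | cons y rest => simp [PySem.Str.join, PySem.Chars.join_cons_cons]

theorem pv_join0_append (X Y : List String) :
    PySem.Str.join "" (X ++ Y) = PySem.Str.join "" X ++ PySem.Str.join "" Y := by
  induction X with
  | nil => simp [pv_join0_nil]
  | cons x X ih => rw [List.cons_append, pv_join0_cons, ih, pv_join0_cons, String.append_assoc]

-- A's inner loop over the term list produces exactly pvPre ++ value ++ pvSuf
theorem pv_fold_eq (term : List (String × String)) (i v : String) :
    term.foldl
      (fun temp t =>
        if t.1 == "before" then (temp.1, t.2 ++ " " ++ temp.2)
        else (temp.1, temp.2 ++ " " ++ t.2))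
      (i, v)
    = (i, pvPre term ++ v ++ pvSuf term) := by
  induction term generalizing v with
  | nil => simp [pvPre, pvSuf, pv_join0_nil]
  | cons t rest ih =>
    cases h : (t.1 == "before") with
    | true =>
      simp only [List.foldl_cons, h, if_true]
      rw [ih]
      simp [pvPre, pvSuf, List.filter_append, bne, h, pv_join0_append,
        pv_join0_cons, pv_join0_nil, String.append_assoc]
    | false =>
      simp only [List.foldl_cons, h, Bool.false_eq_true, if_false]
      rw [ih]
      simp [pvPre, pvSuf, List.filter_append, bne, h,
        pv_join0_cons, String.append_assoc]

-- lookup in the value-mapped literal dict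
theorem pv_get?_mk_map (l : List (String × List (String × String))) (k : String) :
    (PySem.Dict.mk (l.map (fun p => (p.1, (pvPre p.2, pvSuf p.2))))).get? k
      = ((PySem.Dict.mk l).get? k).map (fun ts => (pvPre ts, pvSuf ts)) := by
  induction l with
  | nil => simp [PySem.Dict.get?]
  | cons p rest ih =>
    rw [List.map_cons, PySem.Dict.get?_mk_cons, PySem.Dict.get?_mk_cons]
    cases h : (p.1 == k) with
    | true => simp
    | false => simpa using ih

-- B's wrapped table looks up as Option.map of the original dict lookup
theorem pv_wrapped_get? (GNP_dict : List (String × List (String × String))) (k : String) :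
    ((PySem.Dict.ofList GNP_dict).items.foldl
        (fun d p => d.insert p.1 (pvPre p.2, pvSuf p.2)) PySem.Dict.empty).get? k
      = ((PySem.Dict.ofList GNP_dict).get? k).map (fun ts => (pvPre ts, pvSuf ts)) := by
  have hnd : ((PySem.Dict.ofList GNP_dict).items.map (fun p : String × List (String × String) => p.1)).Nodup := by
    simpa [PySem.Dict.keys] using PySem.Dict.nodup_keys_ofList (ps := GNP_dict)
  have hfold := PySem.Dict.items_foldl_insert_fresh
      (l := (PySem.Dict.ofList GNP_dict).items)
      (k := fun p : String × List (String × String) => p.1)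
      (v := fun p => (pvPre p.2, pvSuf p.2))
      (d := PySem.Dict.empty)
      (by intro a _; simp) hnd
  have heq : ((PySem.Dict.ofList GNP_dict).items.foldl
        (fun d p => d.insert p.1 (pvPre p.2, pvSuf p.2)) PySem.Dict.empty)
      = PySem.Dict.mk ((PySem.Dict.ofList GNP_dict).items.map
          (fun p => (p.1, (pvPre p.2, pvSuf p.2)))) := by
    apply PySem.Dict.ext
    simpa using hfold
  have hmk : PySem.Dict.mk (PySem.Dict.ofList GNP_dict).items = PySem.Dict.ofList GNP_dict := by
    apply PySem.Dict.ext; rfl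
  rw [heq, pv_get?_mk_map, hmk]

-- ===== VERDICT (by name: the statement is the Claim_ definition above) =====
theorem add_GNP_spec : Claim_equal_add_GNP := by
  intro full_data GNP_dict _
  unfold Spec_add_GNP add_GNP add_GNP_alt
  rw [PySem.List.foldl_append_singleton_eq_map]
  refine List.map_congr_left (fun p _ => ?_)
  rw [pv_wrapped_get?]
  cases h : (PySem.Dict.ofList GNP_dict).get? p.1 with
  | none => simp
  | some term => simpa using pv_fold_eq term p.1 p.2
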